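-- pv_equiv track=rewrite | github.com/MariaTroj/CodilityLessons | find_leader_and_equi_leader.py | find_leader
-- ===== SOURCE A (Python) =====
-- def find_leader(A):
--     n = len(A)
--     size = 0
--     for k in range(n):
--         if (size == 0):
--             size += 1
--             value = A[k]
--         else:
--             if (value != A[k]):
--                 size -= 1
--             else:
--                 size += 1
--                 candidate = -1
--     if (size > 0):
--         candidate = value
--         counts = count_occurences(candidate, A)
--         if (counts[-1] > n // 2):
--             return (candidate, counts)
--     return (-1, [])
--
-- def count_occurences(lead, A):
--     n = len(A)
--     counts = [int(A[0] == lead)] * n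
--
--     for i in range(1, n):
--         counts[i] = counts[i-1] + int(A[i] == lead)
--
--     return counts
-- ===== SOURCE B (Python) =====
-- def find_leader(A):
--     n = len(A)
--     freq = {}
--     for x in A:
--         freq[x] = freq.get(x, 0) + 1
--     cand, best = -1, 0
--     for x, c in freq.items():
--         if c > best:
--             cand, best = x, c
--     if best > n // 2:
--         counts = []
--         total = 0
--         for x in A:
--             total += int(x == cand)
--             counts.append(total)
--         return (cand, counts)
--     return (-1, [])
-- ===== Notes on version B (the rewrite author's own statement) =====
-- stated objective: alternative
-- what changed: Replaces the Boyer-Moore voting loop with an explicit frequency dictionary whose argmax is tested against n//2, and builds the prefix-count list by a running total with append instead of allocating a replicated array and updating it index by index.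
import Mathlib
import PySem

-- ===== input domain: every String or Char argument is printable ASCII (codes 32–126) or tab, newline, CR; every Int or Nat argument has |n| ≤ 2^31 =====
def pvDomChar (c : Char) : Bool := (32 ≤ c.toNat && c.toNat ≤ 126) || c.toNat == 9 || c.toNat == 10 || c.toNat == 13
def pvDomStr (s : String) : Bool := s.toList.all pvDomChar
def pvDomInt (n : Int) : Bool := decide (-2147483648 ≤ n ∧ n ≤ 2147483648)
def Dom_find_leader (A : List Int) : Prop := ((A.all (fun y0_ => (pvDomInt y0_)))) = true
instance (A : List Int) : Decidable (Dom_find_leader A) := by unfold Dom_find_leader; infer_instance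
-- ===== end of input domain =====

-- B replaces A's Boyer-Moore voting loop by an explicit frequency dictionary whose argmax is
-- tested against n // 2, and builds the prefix-count list by a running total instead of an
-- in-place array update (objective: alternative; same return value on every input).

-- ===== PORT A =====
-- loop body of A's voting loop (state = (size, value))
def bmStep (p : Int × Int) (x : Int) : Int × Int :=
  if p.1 == 0 then (p.1 + 1, x)
  else if p.2 != x then (p.1 - 1, p.2) else (p.1 + 1, p.2)

-- count_occurences: counts = [int(A[0]==lead)]*n, then counts[i] = counts[i-1] + int(A[i]==lead).
-- All indexings are in range on every call find_leader makes (n ≥ 1 there), so pyGetD/pySetD are exact.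
def count_occurences (lead : Int) (A : List Int) : List Int :=
  let n := A.length
  let counts := List.replicate n (if PySem.List.pyGetD A 0 0 == lead then (1 : Int) else 0)
  (PySem.List.pyRange 1 (n : Int) 1).foldl
    (fun cs i => PySem.List.pySetD cs i
      (PySem.List.pyGetD cs (i - 1) 0 + (if PySem.List.pyGetD A i 0 == lead then (1 : Int) else 0)))
    counts

def find_leader (A : List Int) : Int × List Int :=
  let n : Int := PySem.List.len A
  let sv := (PySem.List.pyRange 0 n 1).foldl (fun p k => bmStep p (PySem.List.pyGetD A k 0)) (0, 0)
  if sv.1 > 0 then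
    let candidate := sv.2
    let counts := count_occurences candidate A
    if PySem.List.pyGetD counts (-1) 0 > PySem.Int.floordiv n 2 then (candidate, counts)
    else (-1, [])
  else (-1, [])

-- ===== PORT B =====
-- loop body of B's argmax-over-items loop (state = (cand, best))
def amaxStep (p : Int × Int) (xc : Int × Int) : Int × Int :=
  if xc.2 > p.2 then (xc.1, xc.2) else p

-- loop body of B's running-total prefix pass (state = (total, counts))
def accStep (c : Int) (p : Int × List Int) (x : Int) : Int × List Int :=
  let t := p.1 + (if x == c then 1 else 0)
  (t, p.2 ++ [t])

def find_leader_alt (A : List Int) : Int × List Int :=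
  let n : Int := PySem.List.len A
  let freq := A.foldl (fun (d : PySem.Dict Int Int) x => d.insert x (d.getD x 0 + 1)) PySem.Dict.empty
  let cb := freq.items.foldl amaxStep (-1, 0)
  if cb.2 > PySem.Int.floordiv n 2 then
    (cb.1, (A.foldl (accStep cb.1) (0, [])).2)
  else (-1, [])

-- ===== PRECONDITION & SPEC =====
def Spec_find_leader (A : List Int) (out : Int × List Int) : Prop := out = find_leader_alt A
instance (A : List Int) (out : Int × List Int) : Decidable (Spec_find_leader A out) := by unfold Spec_find_leader; infer_instance

-- ===== CLAIM (what is proved, stated in full; the proofs are below) =====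
def Claim_equal_find_leader : Prop := ∀ (A : List Int), Dom_find_leader A → Spec_find_leader A (find_leader A)

-- ===== LEMMAS AND PROOFS =====

-- reference prefix-count list: pcounts c l t = running totals t + #occurrences of c
def pcounts (c : Int) : List Int → Int → List Int
  | [], _ => []
  | x :: xs, t =>
    (t + (if x == c then 1 else 0)) :: pcounts c xs (t + (if x == c then 1 else 0))

lemma pcounts_length (c : Int) (l : List Int) (t : Int) : (pcounts c l t).length = l.length := by
  induction l generalizing t with
  | nil => rfl
  | cons x xs ih => simp [pcounts, ih]

lemma pcounts_ne_nil (c : Int) (l : List Int) (t : Int) (h : l ≠ []) : pcounts c l t ≠ [] := by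
  cases l with
  | nil => exact absurd rfl h
  | cons x xs => simp [pcounts]

lemma pcounts_getLast? (c : Int) (l : List Int) (t : Int) (h : l ≠ []) :
    (pcounts c l t).getLast? = some (t + (l.count c : Int)) := by
  induction l generalizing t with
  | nil => exact absurd rfl h
  | cons x xs ih =>
    cases xs with
    | nil => simp [pcounts, List.count_cons]
    | cons y ys =>
      show (_ :: pcounts c (y :: ys) _).getLast? = _
      rcases hne : pcounts c (y :: ys) (t + (if x == c then 1 else 0)) with _ | ⟨u, us⟩
      · exact absurd hne (pcounts_ne_nil c (y :: ys) _ (by simp))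
      · rw [List.getLast?_cons_cons, ← hne, ih _ (by simp)]
        simp [List.count_cons]
        split <;> simp_all <;> ring

lemma pcounts_snoc (c : Int) (l : List Int) (a t : Int) :
    pcounts c (l ++ [a]) t = pcounts c l t ++ [t + (l.count c : Int) + (if a == c then 1 else 0)] := by
  induction l generalizing t with
  | nil => simp [pcounts]
  | cons x xs ih =>
    simp only [List.cons_append, pcounts, ih, List.count_cons]
    split <;> simp_all <;> ring_nf

-- B's running-total pass computes pcounts
lemma accStep_fold (c : Int) (l : List Int) (t : Int) (acc : List Int) :
    l.foldl (accStep c) (t, acc) = (t + (l.count c : Int), acc ++ pcounts c l t) := by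
  induction l generalizing t acc with
  | nil => simp [pcounts]
  | cons x xs ih =>
    simp only [List.foldl_cons, accStep, ih, pcounts, List.count_cons, Prod.mk.injEq]
    refine ⟨by split <;> simp <;> ring, by simp⟩

lemma getD_last {l : List Int} (d : Int) :
    l.getD (l.length - 1) d = (l.getLast?).getD d := by
  simp [List.getD, List.getLast?_eq_getElem?]

-- the in-place update loop of count_occurences, characterised by an invariant on the prefix
lemma co_loop (c : Int) (A : List Int) (dv : Int) :
    ∀ (k j : Nat), 1 ≤ j → j + k = A.length →
    (PySem.List.pyRange (j : Int) (A.length : Int) 1).foldl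
      (fun cs i => PySem.List.pySetD cs i
        (PySem.List.pyGetD cs (i - 1) 0 + (if PySem.List.pyGetD A i 0 == c then (1 : Int) else 0)))
      (pcounts c (A.take j) 0 ++ List.replicate k dv) = pcounts c A 0 := by
  intro k
  induction k with
  | zero =>
    intro j h1 h2
    rw [PySem.List.pyRange_one_eq_nil (by omega)]
    have ht : A.take j = A := List.take_of_length_le (by omega)
    rw [ht]
    simp
  | succ k ih =>
    intro j h1 h2
    have hj : j < A.length := by omega
    rw [PySem.List.pyRange_one_cons (by exact_mod_cast hj)]
    simp only [List.foldl_cons]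
    have hlenP : (pcounts c (A.take j) 0).length = j := by
      rw [pcounts_length]; simp [Nat.min_eq_left (le_of_lt hj)]
    have hPne : pcounts c (A.take j) 0 ≠ [] := by
      intro hnil; rw [hnil] at hlenP; simp at hlenP; omega
    have hread : PySem.List.pyGetD (pcounts c (A.take j) 0 ++ List.replicate (k + 1) dv)
        ((j : Int) - 1) 0 = ((A.take j).count c : Int) := by
      have hidx : ((j : Int) - 1) = ((j - 1 : Nat) : Int) := by omega
      rw [hidx, PySem.List.pyGetD_natCast,
        List.getD_append _ _ _ _ (by omega)]
      have : j - 1 = (pcounts c (A.take j) 0).length - 1 := by omega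
      rw [this, getD_last _, pcounts_getLast? c _ 0 (by
        intro hnil; rw [hnil] at hlenP; simp [pcounts] at hlenP; omega)]
      simp
    have hgetA : PySem.List.pyGetD A (j : Int) 0 = A[j] := by
      rw [PySem.List.pyGetD_natCast, List.getD_eq_getElem _ _ hj]
    rw [hread, hgetA, PySem.List.pySetD_natCast]
    have hset : ∀ (P : List Int) (v : Int), P.length = j →
        (P ++ List.replicate (k + 1) dv).set j v = (P ++ [v]) ++ List.replicate k dv := by
      intro P v hP
      subst hP
      rw [List.replicate_succ]
      simp
    rw [hset _ _ hlenP]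
    have hsnoc : pcounts c (A.take j) 0 ++
        [((A.take j).count c : Int) + (if A[j] == c then (1 : Int) else 0)]
        = pcounts c (A.take (j + 1)) 0 := by
      rw [List.take_succ_eq_append_getElem hj, pcounts_snoc]
      simp
    rw [hsnoc]
    have hcast : (j : Int) + 1 = ((j + 1 : Nat) : Int) := by push_cast; ring
    rw [hcast]
    exact ih (j + 1) (by omega) (by omega)

-- A's count_occurences computes pcounts (on nonempty input)
lemma count_occurences_eq (c : Int) (A : List Int) (h : A ≠ []) :
    count_occurences c A = pcounts c A 0 := by
  obtain ⟨a, rest, rfl⟩ := List.exists_cons_of_ne_nil h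
  simp only [count_occurences, PySem.List.pyGetD_zero_cons]
  have hinit : List.replicate (a :: rest).length (if a == c then (1 : Int) else 0)
      = pcounts c ((a :: rest).take 1) 0 ++
        List.replicate rest.length (if a == c then (1 : Int) else 0) := by
    simp [pcounts, List.replicate_succ]
  rw [hinit]
  exact co_loop c (a :: rest) _ rest.length 1 (by omega) (by simp; omega)

-- Boyer-Moore potential
def bmPhi (st : Int × Int) (x : Int) : Int := (if x = st.2 then 2 * st.1 else 0) - st.1

lemma bm_fold_inv (l : List Int) (st : Int × Int) (hs : 0 ≤ st.1) (x : Int) :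
    0 ≤ (l.foldl bmStep st).1 ∧
    2 * (l.count x : Int) + bmPhi st x ≤ (l.length : Int) + bmPhi (l.foldl bmStep st) x := by
  induction l generalizing st with
  | nil => simpa using hs
  | cons a as ih =>
    have hstep : 0 ≤ (bmStep st a).1 ∧
        2 * (if a = x then (1 : Int) else 0) + bmPhi st x ≤ 1 + bmPhi (bmStep st a) x := by
      simp only [bmStep, bmPhi, beq_iff_eq, bne_iff_ne, ne_eq]
      split_ifs <;> simp <;> omega
    obtain ⟨h1, h2⟩ := ih (bmStep st a) hstep.1 
    refine ⟨by simpa using h1, ?_⟩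
    have := hstep.2
    simp only [List.foldl_cons, List.count_cons, List.length_cons] at *
    have : (((as.count x + if a == x then 1 else 0 : Nat)) : Int)
        = (as.count x : Int) + (if a = x then 1 else 0) := by
      split <;> simp_all
    rw [this]
    omega

lemma count_pair_le_length (l : List Int) (a b : Int) (h : a ≠ b) :
    l.count a + l.count b ≤ l.length := by
  induction l with
  | nil => simp
  | cons x xs ih =>
    simp only [List.count_cons, List.length_cons]
    by_cases hxa : x = a <;> by_cases hxb : x = b <;> simp_all <;> omega

-- argmax fold facts
lemma amax_fold_ge (L : List (Int × Int)) (p0 : Int × Int) :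
    p0.2 ≤ (L.foldl amaxStep p0).2 ∧ ∀ q ∈ L, q.2 ≤ (L.foldl amaxStep p0).2 := by
  induction L generalizing p0 with
  | nil => simp
  | cons q L ih =>
    obtain ⟨h1, h2⟩ := ih (amaxStep p0 q)
    have hq : p0.2 ≤ (amaxStep p0 q).2 ∧ q.2 ≤ (amaxStep p0 q).2 := by
      unfold amaxStep; split <;> simp <;> omega
    exact ⟨le_trans hq.1 h1, by
      intro r hr
      rcases List.mem_cons.mp hr with rfl | hr
      · exact le_trans hq.2 h1
      · exact h2 r hr⟩

lemma amax_fold_mem (L : List (Int × Int)) (p0 : Int × Int) :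
    L.foldl amaxStep p0 = p0 ∨ L.foldl amaxStep p0 ∈ L := by
  induction L generalizing p0 with
  | nil => simp
  | cons q L ih =>
    rcases ih (amaxStep p0 q) with h | h
    · rw [List.foldl_cons, h]
      unfold amaxStep
      split
      · right; simp
      · left; rfl
    · right; simp [List.foldl_cons, List.mem_cons]; right; exact h

lemma floordiv_two_lt (n c : Int) : PySem.Int.floordiv n 2 < c ↔ n < 2 * c := by
  rw [PySem.Int.floordiv_eq_ediv_of_pos (by omega)]
  omega

-- the two ports in closed form
lemma find_leader_eq (A : List Int) :
    find_leader A =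
      if 0 < (A.foldl bmStep (0, 0)).1 then
        if PySem.List.pyGetD (count_occurences (A.foldl bmStep (0, 0)).2 A) (-1) 0 >
            PySem.Int.floordiv (A.length : Int) 2 then
          ((A.foldl bmStep (0, 0)).2, count_occurences (A.foldl bmStep (0, 0)).2 A)
        else (-1, [])
      else (-1, []) := by
  simp only [find_leader, PySem.List.len_eq, gt_iff_lt]
  rw [PySem.List.foldl_pyRange_zero_pyGetD' A 0 bmStep (0, 0)]

lemma find_leader_alt_eq (A : List Int) :
    find_leader_alt A =
      if ((((PySem.Set.ofList A).map (fun k => (k, (A.count k : Int)))).foldl amaxStep (-1, 0)).2 >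
          PySem.Int.floordiv (A.length : Int) 2) then
        (((((PySem.Set.ofList A).map (fun k => (k, (A.count k : Int)))).foldl amaxStep (-1, 0)).1),
          pcounts ((((PySem.Set.ofList A).map (fun k => (k, (A.count k : Int)))).foldl amaxStep (-1, 0)).1) A 0)
      else (-1, []) := by
  simp only [find_leader_alt, PySem.List.len_eq,
    PySem.Dict.foldl_insert_getD_add_one_eq_counter, PySem.Dict.items_counter, accStep_fold]
  simp

-- last element of A's counts list is the total count
lemma last_counts (c : Int) (A : List Int) (h : A ≠ []) :
    PySem.List.pyGetD (count_occurences c A) (-1) 0 = (A.count c : Int) := by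
  rw [count_occurences_eq c A h]
  have hne : pcounts c A 0 ≠ [] := pcounts_ne_nil c A 0 h
  rw [PySem.List.pyGetD_neg_one (pcounts c A 0) 0 hne]
  have h1 := pcounts_getLast? c A 0 h
  rw [List.getLast?_eq_some_getLast hne] at h1
  simpa using h1

-- ===== VERDICT (by name: the statement is the Claim_ definition above) =====
theorem find_leader_spec : Claim_equal_find_leader := by
  intro A _
  unfold Spec_find_leader
  rw [find_leader_eq, find_leader_alt_eq]
  set r := A.foldl bmStep (0, 0) with hr
  set L := (PySem.Set.ofList A).map (fun k => (k, (A.count k : Int))) with hL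
  set cb := L.foldl amaxStep (-1, 0) with hcb
  have hr0 : 0 ≤ r.1 := (bm_fold_inv A (0, 0) (by norm_num) 0).1
  have hphi0 : ∀ x : Int, bmPhi (0, 0) x = 0 := by intro x; simp [bmPhi]
  have hbound : ∀ x : Int, 2 * (A.count x : Int) ≤ (A.length : Int) + bmPhi r x := by
    intro x
    have h := (bm_fold_inv A (0, 0) (by norm_num) x).2
    rw [hphi0 x] at h
    linarith
  have hge : ∀ x ∈ A, (A.count x : Int) ≤ cb.2 := by
    intro x hx
    have hmem : (x, (A.count x : Int)) ∈ L := by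
      rw [hL]
      exact List.mem_map_of_mem ((PySem.Set.mem_ofList A x).mpr hx)
    exact (amax_fold_ge L (-1, 0)).2 _ hmem
  have hmem' : cb = (-1, 0) ∨ ∃ x ∈ A, cb = (x, (A.count x : Int)) := by
    rcases amax_fold_mem L (-1, 0) with h | h
    · exact Or.inl h
    · right
      rw [hL] at h
      rcases List.mem_map.mp h with ⟨k, hk, hkeq⟩
      exact ⟨k, (PySem.Set.mem_ofList A k).mp hk, hkeq.symm⟩
  by_cases hmaj : ∃ m ∈ A, (A.length : Int) < 2 * (A.count m : Int)
  · obtain ⟨m, hmA, hm2⟩ := hmaj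
    have hne : A ≠ [] := by rintro rfl; simp at hmA
    have hrv : r.2 = m := by
      by_contra hcon
      have h := hbound m
      have hcon' : ¬ (m = r.2) := fun h' => hcon h'.symm
      have : bmPhi r m = -r.1 := by simp [bmPhi, hcon']
      rw [this] at h
      linarith
    have hr1 : 0 < r.1 := by
      have h := hbound m
      have : bmPhi r m = 2 * r.1 - r.1 := by simp [bmPhi, hrv]
      rw [this] at h
      linarith
    have hcountpos : 0 < A.count m := List.count_pos_iff.mpr hmA
    have hcbm : cb = (m, (A.count m : Int)) := by
      rcases hmem' with h | ⟨x, hxA, hx⟩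
      · have h1 := hge m hmA
        rw [h] at h1
        simp at h1
        omega
      · rcases eq_or_ne x m with rfl | hxm
        · exact hx
        · exfalso
          have hsum := count_pair_le_length A x m hxm
          have h1 := hge m hmA
          rw [hx] at h1
          simp at h1
          have hlen : (A.count x : Int) + (A.count m : Int) ≤ (A.length : Int) := by
            exact_mod_cast hsum
          omega
    rw [if_pos hr1, hrv, last_counts m A hne, hcbm]
    simp only [gt_iff_lt, floordiv_two_lt]
    rw [if_pos hm2, if_pos hm2, count_occurences_eq m A hne]
  · push Not at hmaj
    have hBfalse : ¬ (cb.2 > PySem.Int.floordiv (A.length : Int) 2) := by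
      rw [gt_iff_lt, floordiv_two_lt]
      rcases hmem' with h | ⟨x, hxA, hx⟩
      · rw [h]
        simp
      · rw [hx]
        exact not_lt.mpr (hmaj x hxA)
    rw [if_neg hBfalse]
    by_cases hr1 : 0 < r.1
    · have hne : A ≠ [] := by
        rintro rfl
        rw [hr] at hr1
        simp [List.foldl_nil] at hr1
      have hcle : 2 * (A.count r.2 : Int) ≤ (A.length : Int) := by
        by_cases hmem : r.2 ∈ A
        · exact hmaj r.2 hmem
        · rw [List.count_eq_zero_of_not_mem hmem]
          positivity
      rw [if_pos hr1, last_counts r.2 A hne, if_neg]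
      rw [gt_iff_lt, floordiv_two_lt]
      exact not_lt.mpr hcle
    · rw [if_neg hr1]
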